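-- pv_equiv track=rewrite | github.com/sssungjin/Algorithm | 프로그래머스/lv1/17681. ［1차］ 비밀지도/［1차］ 비밀지도.py | solution
-- ===== SOURCE A (Python) =====
-- def solution(n, arr1, arr2):
--     answer = [''] * n
--     map1, map2 = [bin(i)[2:] for i in arr1], [bin(i)[2:] for i in arr2]
--
--     idx = 0
--     for i,j in zip(map1, map2):
--         map1[idx] = i.zfill(n)
--         map2[idx] = j.zfill(n)
--         idx += 1
--     for i in range(n):
--         for j in range(n):
--             if map1[i][j] == '1' or map2[i][j] == '1':
--                 answer[i] += '#'
--             else: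
--                 answer[i] += ' '
--     return answer
-- ===== SOURCE B (Python) =====
-- def solution(n, arr1, arr2):
--     table = str.maketrans('01', ' #')
--     return [bin(arr1[i] | arr2[i])[2:].zfill(n).translate(table) for i in range(n)]
-- ===== Notes on version B (the rewrite author's own statement) =====
-- stated objective: idiomatic
-- what changed: Instead of zfilling both rows' bit strings and comparing characters position by position in a nested loop, B ORs the two row integers once and renders the single combined value with bin/zfill and a translation table, one comprehension step per row.
-- outside the precondition, e.g. on solution(2, [-1, 1], [0, 0]): A returns [' #', ' #'], B returns ['b#', ' #']; on solution(2, [5, 1], [0, 0]): A returns ['# ', ' #'], B returns ['# #', ' #']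
import Mathlib
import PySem

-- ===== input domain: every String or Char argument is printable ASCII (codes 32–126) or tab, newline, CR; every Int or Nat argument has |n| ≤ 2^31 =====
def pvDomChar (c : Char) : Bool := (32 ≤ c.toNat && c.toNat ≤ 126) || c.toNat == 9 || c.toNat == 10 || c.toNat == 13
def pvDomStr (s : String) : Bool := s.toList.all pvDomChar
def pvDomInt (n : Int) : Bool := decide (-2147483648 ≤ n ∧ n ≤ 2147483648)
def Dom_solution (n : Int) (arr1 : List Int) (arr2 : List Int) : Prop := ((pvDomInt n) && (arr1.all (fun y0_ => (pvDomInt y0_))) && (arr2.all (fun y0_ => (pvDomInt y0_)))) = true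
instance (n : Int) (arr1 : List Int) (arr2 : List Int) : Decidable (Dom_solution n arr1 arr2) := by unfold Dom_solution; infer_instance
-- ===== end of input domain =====

-- B replaces A's per-character comparison of two zfilled bit strings by one integer OR per
-- row rendered directly (bin/zfill + translation table) — objective: idiomatic.
-- Python strings are carried as List Char (PySem.Chars) and wrapped with String.ofList on return.

-- ===== PORT A =====
-- bin(x)[2:]
def pvBinTail (x : Int) : List Char :=
  PySem.List.slice (PySem.Int.toBinChars0b x) (some 2) none

def solution (n : Int) (arr1 : List Int) (arr2 : List Int) : List String :=
  -- answer = [''] * n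
  let answer : List (List Char) := PySem.List.pyRepeat [([] : List Char)] n
  -- map1, map2 = [bin(i)[2:] for i in arr1], [bin(i)[2:] for i in arr2]
  let map1 := arr1.map pvBinTail
  let map2 := arr2.map pvBinTail
  -- idx = 0; for i,j in zip(map1, map2): map1[idx] = i.zfill(n); map2[idx] = j.zfill(n); idx += 1
  let st := (map1.zip map2).foldl
    (fun (st : List (List Char) × List (List Char) × Int) p =>
      (PySem.List.pySetD st.1 st.2.2 (PySem.Chars.zfill p.1 n),
       PySem.List.pySetD st.2.1 st.2.2 (PySem.Chars.zfill p.2 n),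
       st.2.2 + 1))
    (map1, map2, (0 : Int))
  -- for i in range(n): for j in range(n): answer[i] += '#' if … else ' '
  let ans := (PySem.List.pyRange 0 n 1).foldl
    (fun ans i =>
      PySem.List.pySetD ans i
        ((PySem.List.pyRange 0 n 1).foldl
          (fun row j =>
            if PySem.List.pyGetD (PySem.List.pyGetD st.1 i []) j ' ' = '1'
               ∨ PySem.List.pyGetD (PySem.List.pyGetD st.2.1 i []) j ' ' = '1'
            then row ++ ['#'] else row ++ [' '])
          (PySem.List.pyGetD ans i [])))
    answer
  ans.map String.ofList

-- ===== PORT B =====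
-- str.maketrans('01', ' #'): '0'→' ', '1'→'#', everything else unchanged
def pvTr (c : Char) : Char :=
  if c = '0' then ' ' else if c = '1' then '#' else c

def solution_alt (n : Int) (arr1 : List Int) (arr2 : List Int) : List String :=
  (PySem.List.pyRange 0 n 1).map (fun i =>
    String.ofList
      ((PySem.Chars.zfill
          (pvBinTail (PySem.Int.bor (PySem.List.pyGetD arr1 i 0) (PySem.List.pyGetD arr2 i 0)))
          n).map pvTr))

-- ===== PRECONDITION & SPEC =====
-- Pre_ excludes: n larger than a list length (A raises IndexError there); and rows among the
-- first n that are negative or >= 2^n, where A's strings (a literal 'b' sign character, resp. the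
-- high bits of each operand truncated separately) are artefacts of its per-string indexing that no
-- integer-OR formulation reproduces -- the problem guarantees 0 <= value < 2^n.
def Pre_solution (n : Int) (arr1 : List Int) (arr2 : List Int) : Prop :=
  n ≤ arr1.length ∧ n ≤ arr2.length ∧
  (∀ x ∈ arr1.take n.toNat, 0 ≤ x ∧ x < 2 ^ n.toNat) ∧
  (∀ x ∈ arr2.take n.toNat, 0 ≤ x ∧ x < 2 ^ n.toNat)
instance (n : Int) (arr1 : List Int) (arr2 : List Int) : Decidable (Pre_solution n arr1 arr2) := by
  unfold Pre_solution; infer_instance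

def pvWitness_solution : Int × List Int × List Int := (2, [1, 2], [2, 1])

def Spec_solution (n : Int) (arr1 : List Int) (arr2 : List Int) (out : List String) : Prop := out = solution_alt n arr1 arr2
instance (n : Int) (arr1 : List Int) (arr2 : List Int) (out : List String) : Decidable (Spec_solution n arr1 arr2 out) := by unfold Spec_solution; infer_instance

-- ===== CLAIM (what is proved, stated in full; the proofs are below) =====
def Claim_equal_solution : Prop := ∀ (n : Int) (arr1 : List Int) (arr2 : List Int), Dom_solution n arr1 arr2 → Pre_solution n arr1 arr2 → Spec_solution n arr1 arr2 (solution n arr1 arr2)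

-- ===== LEMMAS AND PROOFS =====

-- the binary digits of x, most significant first, written with exactly m digits
def pvBits (m : Nat) (x : Nat) : List Char :=
  (List.range m).reverse.map (fun k => if x.testBit k then '1' else '0')

-- the digits Nat.toDigits 2 produces, as a structural recursion
def pvBitsPos (x : Nat) : List Char :=
  if _h : x < 2 then [Nat.digitChar x]
  else pvBitsPos (x / 2) ++ [Nat.digitChar (x % 2)]
decreasing_by exact Nat.div_lt_self (by omega) (by omega)

theorem pv_toDigitsCore (fuel : Nat) : ∀ (x : Nat) (acc : List Char), 0 < fuel → x < 2 ^ fuel →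
    Nat.toDigitsCore 2 fuel x acc = pvBitsPos x ++ acc := by
  induction fuel with
  | zero => intro x acc h _; omega
  | succ f ih =>
    intro x acc _ hx
    by_cases h2 : x < 2
    · have hd : x / 2 = 0 := by omega
      have hm : x % 2 = x := by omega
      rw [pvBitsPos]
      simp [Nat.toDigitsCore, hd, hm, h2]
    · have hd : ¬ x / 2 = 0 := by omega
      have hf : 0 < f := by
        by_contra hf0
        have : f = 0 := by omega
        subst this
        simp at hx
        omega
      have hx2 : x / 2 < 2 ^ f := by
        have h2f : 2 ^ (f + 1) = 2 ^ f * 2 := pow_succ 2 f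
        omega
      rw [show Nat.toDigitsCore 2 (f + 1) x acc
            = Nat.toDigitsCore 2 f (x / 2) ((x % 2).digitChar :: acc) by
          simp [Nat.toDigitsCore, hd]]
      rw [ih (x / 2) _ hf hx2]
      conv_rhs => rw [pvBitsPos]
      rw [dif_neg h2]
      simp

theorem pv_toDigits (x : Nat) : Nat.toDigits 2 x = pvBitsPos x := by
  have h := pv_toDigitsCore (x + 1) x [] (by omega)
    (lt_of_lt_of_le Nat.lt_two_pow_self (Nat.pow_le_pow_right (by omega) (by omega)))
  simpa [Nat.toDigits] using h

theorem pvBits_length (m x : Nat) : (pvBits m x).length = m := by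
  simp [pvBits]

theorem pvBits_succ (m x : Nat) :
    pvBits (m + 1) x = (if x.testBit m then '1' else '0') :: pvBits m x := by
  simp [pvBits, List.range_succ]

theorem pvBits_pop (m x : Nat) :
    pvBits (m + 1) x = pvBits m (x / 2) ++ [if x.testBit 0 then '1' else '0'] := by
  have h : (List.range (m + 1)).reverse = ((List.range m).reverse.map Nat.succ) ++ [0] := by
    rw [List.range_succ_eq_map]
    simp [List.map_reverse]
  simp [pvBits, h, Nat.testBit_add_one, Function.comp]

theorem pvBitsPos_eq (x : Nat) (hx : 0 < x) : pvBitsPos x = pvBits (Nat.log2 x + 1) x := by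
  induction x using Nat.strong_induction_on with
  | _ x ih =>
    by_cases h2 : x < 2
    · have : x = 1 := by omega
      subst this
      rw [pvBitsPos]
      simp [pvBits]
      decide
    · rw [pvBitsPos]
      rw [dif_neg h2]
      have hdiv : 0 < x / 2 := by omega
      rw [ih (x / 2) (Nat.div_lt_self (by omega) (by omega)) hdiv]
      rw [show Nat.log2 x = Nat.log2 (x / 2) + 1 by
        rw [Nat.log2_def]; simp [show 2 ≤ x by omega]]
      conv_rhs => rw [pvBits_pop (Nat.log2 (x / 2) + 1) x]
      congr 1
      have hm2 : x % 2 = 0 ∨ x % 2 = 1 := by omega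
      rcases hm2 with h | h <;>
        simp [h, Nat.testBit_zero, Nat.digitChar]

theorem pvBitsPos_mem (x : Nat) : ∀ c ∈ pvBitsPos x, c = '0' ∨ c = '1' := by
  induction x using Nat.strong_induction_on with
  | _ x ih =>
    intro c hc
    by_cases h2 : x < 2
    · rw [pvBitsPos] at hc
      simp [h2] at hc
      subst hc
      interval_cases x
      · left; rfl
      · right; rfl
    · rw [pvBitsPos] at hc
      rw [dif_neg h2] at hc
      rw [List.mem_append] at hc
      rcases hc with hc | hc
      · exact ih (x / 2) (Nat.div_lt_self (by omega) (by omega)) c hc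
      · simp at hc
        subst hc
        have hm2 : x % 2 = 0 ∨ x % 2 = 1 := by omega
        rcases hm2 with h | h <;> simp [h, Nat.digitChar]

theorem pv_zfill (cs : List Char) (m : Nat) (hne : cs ≠ [])
    (hhd : ¬(cs.head hne = '+' ∨ cs.head hne = '-')) :
    PySem.Chars.zfill cs (m : Int) = List.replicate (m - cs.length) '0' ++ cs := by
  by_cases hle : (m : Int) ≤ cs.length
  · have h0 : m - cs.length = 0 := by omega
    simp [PySem.Chars.zfill, hle, h0]
  · cases cs with
    | nil => simp at hne
    | cons c rest =>
      simp at hhd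
      simp [PySem.Chars.zfill, hhd]
      omega

theorem pvBits_pad (L m x : Nat) (h : L ≤ m) (hx : x < 2 ^ L) :
    pvBits m x = List.replicate (m - L) '0' ++ pvBits L x := by
  induction m with
  | zero =>
    have : L = 0 := by omega
    subst this
    simp
  | succ m ih =>
    rcases Nat.lt_or_ge L (m + 1) with h1 | h1
    · have hL : L ≤ m := by omega
      have ht : x.testBit m = false :=
        Nat.testBit_eq_false_of_lt (lt_of_lt_of_le hx (Nat.pow_le_pow_right (by omega) hL))
      rw [pvBits_succ, ht, ih hL]
      rw [show m + 1 - L = (m - L) + 1 by omega, List.replicate_succ]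
      simp
    · have : L = m + 1 := by omega
      subst this
      simp

theorem pv_zfillBin (m x : Nat) (hm : 0 < m) (hx : x < 2 ^ m) :
    PySem.Chars.zfill (Nat.toDigits 2 x) (m : Int) = pvBits m x := by
  rcases Nat.eq_zero_or_pos x with h0 | h0
  · subst h0
    have ht : Nat.toDigits 2 0 = ['0'] := by
      rw [pv_toDigits, pvBitsPos]
      simp [Nat.digitChar]
    rw [ht, pv_zfill _ m (by simp) (by simp)]
    have hb : pvBits m 0 = List.replicate m '0' := by
      simp [pvBits, Nat.zero_testBit]
    rw [hb, show (['0'] : List Char) = List.replicate 1 '0' from rfl,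
        ← List.replicate_add]
    congr 1
    simp
    omega
  · have hL : Nat.log2 x + 1 ≤ m := by
      have := (Nat.log2_lt (by omega)).mpr hx
      omega
    have hhd : ∀ c ∈ pvBitsPos x, c = '0' ∨ c = '1' := pvBitsPos_mem x
    have hne : pvBitsPos x ≠ [] := by
      rw [pvBitsPos_eq x h0]
      intro h
      have := pvBits_length (Nat.log2 x + 1) x
      rw [h] at this
      simp at this
    rw [pv_toDigits, pv_zfill _ m hne (by
      have hmem := hhd _ (List.head_mem hne)
      rcases hmem with h | h <;> simp [h])]
    rw [pvBitsPos_eq x h0, pvBits_length]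
    exact (pvBits_pad _ _ _ hL (lt_of_lt_of_le Nat.lt_log2_self (le_refl _))).symm

theorem pvBinTail_nonneg (x : Int) (hx : 0 ≤ x) : pvBinTail x = Nat.toDigits 2 x.toNat := by
  unfold pvBinTail
  rw [PySem.Int.toBinChars0b]
  rw [if_neg (by omega)]
  rw [PySem.List.slice_from _ (by omega)]
  rfl

-- the zip/zfill write-back loop of A, solved in closed form
theorem pv_pySetD {α : Type} (a : List α) (k : Nat) (v : α) (h : k < a.length) :
    PySem.List.pySetD a (k : Int) v = a.set k v := by
  simp [PySem.List.pySetD, PySem.List.pySet?, PySem.List.pyIdx?, h]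

theorem pv_zipwrite (n : Int) :
    ∀ (p q done doneb rest restb : List (List Char)),
      (p.zip q).length ≤ rest.length → (p.zip q).length ≤ restb.length →
      doneb.length = done.length →
      (p.zip q).foldl
        (fun (st : List (List Char) × List (List Char) × Int) pr =>
          (PySem.List.pySetD st.1 st.2.2 (PySem.Chars.zfill pr.1 n),
           PySem.List.pySetD st.2.1 st.2.2 (PySem.Chars.zfill pr.2 n),
           st.2.2 + 1))
        (done ++ rest, doneb ++ restb, (done.length : Int)) =
      (done ++ (p.zip q).map (fun pr => PySem.Chars.zfill pr.1 n) ++ rest.drop (p.zip q).length,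
       doneb ++ (p.zip q).map (fun pr => PySem.Chars.zfill pr.2 n) ++ restb.drop (p.zip q).length,
       ((done.length + (p.zip q).length : Nat) : Int)) := by
  intro p
  induction p with
  | nil => intro q done doneb rest restb ha hb hd; simp
  | cons P p' ih =>
    intro q done doneb rest restb ha hb hd
    cases q with
    | nil => simp
    | cons Q q' =>
      simp only [List.zip_cons_cons, List.foldl_cons, List.length_cons] at *
      cases rest with
      | nil => simp at ha
      | cons r rest' =>
        cases restb with
        | nil => simp at hb
        | cons rb restb' =>
          have hstep1 : PySem.List.pySetD (done ++ r :: rest') ((done.length : Nat) : Int)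
              (PySem.Chars.zfill P n) = (done ++ [PySem.Chars.zfill P n]) ++ rest' := by
            rw [pv_pySetD _ _ _ (by simp)]
            rw [List.set_append, if_neg (by omega)]
            simp
          have hstep2 : PySem.List.pySetD (doneb ++ rb :: restb') ((done.length : Nat) : Int)
              (PySem.Chars.zfill Q n) = (doneb ++ [PySem.Chars.zfill Q n]) ++ restb' := by
            rw [← hd, pv_pySetD _ _ _ (by simp)]
            rw [List.set_append, if_neg (by omega)]
            simp
          rw [hstep1, hstep2]
          have hcast : (done.length : Int) + 1 = (((done ++ [PySem.Chars.zfill P n]).length : Nat) : Int) := by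
            simp
          rw [hcast]
          rw [ih q' (done ++ [PySem.Chars.zfill P n]) (doneb ++ [PySem.Chars.zfill Q n]) rest' restb'
            (by simp at ha ⊢; omega) (by simp at hb ⊢; omega) (by simp [hd])]
          simp only [Prod.mk.injEq]
          refine ⟨by simp, by simp, by simp; omega⟩

-- A's row-building loop over answer = [''] * n, solved in closed form
theorem pv_mapwrite (st1 st2 : List (List Char)) (L : List Int) (m : Nat) :
    ∀ (k : Nat), k ≤ m →
      ((List.range k).map (fun (j : Nat) => (j : Int))).foldl
        (fun ans i =>
          PySem.List.pySetD ans i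
            (L.foldl
              (fun row j =>
                if PySem.List.pyGetD (PySem.List.pyGetD st1 i []) j ' ' = '1'
                   ∨ PySem.List.pyGetD (PySem.List.pyGetD st2 i []) j ' ' = '1'
                then row ++ ['#'] else row ++ [' '])
              (PySem.List.pyGetD ans i [])))
        (List.replicate m ([] : List Char)) =
      (List.range k).map (fun (i : Nat) =>
        L.foldl
          (fun row j =>
            if PySem.List.pyGetD (PySem.List.pyGetD st1 (i : Int) []) j ' ' = '1'
               ∨ PySem.List.pyGetD (PySem.List.pyGetD st2 (i : Int) []) j ' ' = '1'
            then row ++ ['#'] else row ++ [' '])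
          []) ++ List.replicate (m - k) [] := by
  intro k
  induction k with
  | zero => intro _; simp
  | succ k ih =>
    intro hk
    simp only [List.range_succ, List.map_append, List.map_cons, List.map_nil,
      List.foldl_append, List.foldl_cons, List.foldl_nil]
    rw [ih (by omega)]
    have hlen : ((List.range k).map (fun (i : Nat) =>
        L.foldl
          (fun row j =>
            if PySem.List.pyGetD (PySem.List.pyGetD st1 (i : Int) []) j ' ' = '1'
               ∨ PySem.List.pyGetD (PySem.List.pyGetD st2 (i : Int) []) j ' ' = '1'
            then row ++ ['#'] else row ++ [' '])
          [])).length = k := by simp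
    have hget : PySem.List.pyGetD ((List.range k).map (fun (i : Nat) =>
        L.foldl
          (fun row j =>
            if PySem.List.pyGetD (PySem.List.pyGetD st1 (i : Int) []) j ' ' = '1'
               ∨ PySem.List.pyGetD (PySem.List.pyGetD st2 (i : Int) []) j ' ' = '1'
            then row ++ ['#'] else row ++ [' '])
          []) ++ List.replicate (m - k) []) ((k : Nat) : Int) [] = ([] : List Char) := by
      rw [PySem.List.pyGetD_natCast]
      rw [List.getD_eq_getElem _ _ (by simp; omega)]
      rw [List.getElem_append_right (by omega)]
      simp
    rw [hget]
    rw [pv_pySetD _ _ _ (by simp; omega)]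
    rw [List.set_append, if_neg (by omega), hlen]
    rw [show m - k = (m - (k + 1)) + 1 by omega, List.replicate_succ]
    simp

theorem pv_row (m : Nat) (x y : Int) (hx : 0 ≤ x) (hy : 0 ≤ y)
    (hx2 : x.toNat < 2 ^ m) (hy2 : y.toNat < 2 ^ m) (hm : 0 < m) :
    (List.range m).map (fun (j : Nat) =>
        if PySem.List.pyGetD (PySem.Chars.zfill (pvBinTail x) (m : Int)) (j : Int) ' ' = '1'
           ∨ PySem.List.pyGetD (PySem.Chars.zfill (pvBinTail y) (m : Int)) (j : Int) ' ' = '1'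
        then '#' else ' ') =
    (PySem.Chars.zfill (pvBinTail (PySem.Int.bor x y)) (m : Int)).map pvTr := by
  have hbx : PySem.Chars.zfill (pvBinTail x) (m : Int) = pvBits m x.toNat := by
    rw [pvBinTail_nonneg x hx, pv_zfillBin m _ hm hx2]
  have hby : PySem.Chars.zfill (pvBinTail y) (m : Int) = pvBits m y.toNat := by
    rw [pvBinTail_nonneg y hy, pv_zfillBin m _ hm hy2]
  have hbo : PySem.Chars.zfill (pvBinTail (PySem.Int.bor x y)) (m : Int)
      = pvBits m (x.toNat ||| y.toNat) := by
    rw [PySem.Int.bor_of_nonneg hx hy, pvBinTail_nonneg _ (Int.natCast_nonneg _)]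
    rw [Int.toNat_natCast]
    exact pv_zfillBin m _ hm (Nat.or_lt_two_pow hx2 hy2)
  rw [hbx, hby, hbo]
  have hglem : ∀ z : Nat, z < 2 ^ m → ∀ j : Nat, j < m →
      PySem.List.pyGetD (pvBits m z) ((j : Nat) : Int) ' ' = if z.testBit (m - 1 - j) then '1' else '0' := by
    intro z hz j hj
    rw [PySem.List.pyGetD_natCast]
    rw [List.getD_eq_getElem _ _ (by rw [pvBits_length]; omega)]
    simp [pvBits, List.getElem_reverse, List.getElem_range]
  apply List.ext_getElem
  · simp [pvBits_length]
  · intro j h1 h2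
    simp only [List.getElem_map, List.getElem_range]
    have hj : j < m := by simpa using h1
    rw [hglem _ hx2 j hj]
    rw [hglem _ hy2 j hj]
    simp only [pvBits, List.getElem_map, List.getElem_reverse, List.length_range,
      List.getElem_range]
    rw [Nat.testBit_or]
    by_cases hb1 : x.toNat.testBit (m - 1 - j) <;> by_cases hb2 : y.toNat.testBit (m - 1 - j) <;>
      simp [hb1, hb2, pvTr]

theorem pv_getzip1 (u v : List (List Char)) (nn : Int) (i : Nat)
    (hu : i < u.length) (hv : i < v.length) :
    PySem.List.pyGetD ((u.zip v).map (fun pr => PySem.Chars.zfill pr.1 nn)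
        ++ u.drop (u.zip v).length) ((i : Nat) : Int) []
      = PySem.Chars.zfill u[i] nn := by
  rw [PySem.List.pyGetD_natCast, List.getD_eq_getElem _ _ (by simp; omega)]
  rw [List.getElem_append_left (by simp; omega)]
  simp

theorem pv_getzip2 (u v : List (List Char)) (nn : Int) (i : Nat)
    (hu : i < u.length) (hv : i < v.length) :
    PySem.List.pyGetD ((u.zip v).map (fun pr => PySem.Chars.zfill pr.2 nn)
        ++ v.drop (u.zip v).length) ((i : Nat) : Int) []
      = PySem.Chars.zfill v[i] nn := by
  rw [PySem.List.pyGetD_natCast, List.getD_eq_getElem _ _ (by simp; omega)]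
  rw [List.getElem_append_left (by simp; omega)]
  simp

theorem pv_step (c1 c2 : List Char) :
    (fun (row : List Char) (j : Int) =>
      if PySem.List.pyGetD c1 j ' ' = '1' ∨ PySem.List.pyGetD c2 j ' ' = '1'
      then row ++ ['#'] else row ++ [' '])
    = (fun (row : List Char) (j : Int) =>
        row ++ [if PySem.List.pyGetD c1 j ' ' = '1' ∨ PySem.List.pyGetD c2 j ' ' = '1'
                then '#' else ' ']) := by
  funext row j
  split_ifs <;> rfl

-- ===== VERDICT (by name: the statement is the Claim_ definition above) =====
theorem solution_spec : Claim_equal_solution := by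
  unfold Claim_equal_solution
  intro n arr1 arr2 _ hpre
  unfold Spec_solution
  rcases Int.lt_or_le n 0 with hneg | hpos
  · have hr : PySem.List.pyRange 0 n 1 = [] := by
      simp [PySem.List.pyRange]
      omega
    have ha : PySem.List.pyRepeat [([] : List Char)] n = [] := by
      rw [PySem.List.pyRepeat_singleton]
      simp [Int.toNat_of_nonpos (le_of_lt hneg)]
    simp only [solution, solution_alt, hr, ha, List.foldl_nil, List.map_nil]
  · obtain ⟨m, rfl⟩ : ∃ m : Nat, n = (m : Int) := ⟨n.toNat, by omega⟩
    obtain ⟨h1, h2, hv1, hv2⟩ := hpre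
    have hlen1 : m ≤ arr1.length := by exact_mod_cast h1
    have hlen2 : m ≤ arr2.length := by exact_mod_cast h2
    simp only [Int.toNat_natCast] at hv1 hv2
    simp only [solution, solution_alt]
    have hz := pv_zipwrite (m : Int) (arr1.map pvBinTail) (arr2.map pvBinTail) [] []
        (arr1.map pvBinTail) (arr2.map pvBinTail)
        (by simp [List.length_zip]) (by simp [List.length_zip]) rfl
    simp only [List.nil_append, List.length_nil, Nat.cast_zero] at hz
    rw [hz]
    rw [PySem.List.pyRepeat_singleton, Int.toNat_natCast]
    rw [PySem.List.pyRange_zero_natCast]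
    rw [pv_mapwrite _ _ _ m m (le_refl m)]
    simp only [Nat.sub_self, List.replicate_zero, List.append_nil, List.map_map]
    apply List.ext_getElem
    · simp
    · intro i ha hb
      have him : i < m := by simpa using ha
      have hi1 : i < arr1.length := by omega
      have hi2 : i < arr2.length := by omega
      simp only [List.getElem_map, List.getElem_range, Function.comp_apply]
      rw [PySem.List.pyGetD_natCast arr1, List.getD_eq_getElem _ _ (by omega)]
      rw [PySem.List.pyGetD_natCast arr2, List.getD_eq_getElem _ _ (by omega)]
      congr 1
      rw [pv_getzip1 (arr1.map pvBinTail) (arr2.map pvBinTail) ((m : Nat) : Int) i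
          (by simpa using hi1) (by simpa using hi2)]
      rw [pv_getzip2 (arr1.map pvBinTail) (arr2.map pvBinTail) ((m : Nat) : Int) i
          (by simpa using hi1) (by simpa using hi2)]
      simp only [List.getElem_map]
      rw [pv_step]
      rw [PySem.List.foldl_append_singleton_eq_map, List.nil_append, List.map_map]
      have hmem1 : arr1[i] ∈ arr1.take m := by
        rw [← List.getElem_take (xs := arr1) (j := m) (i := i) (h := by simp; omega)]
        exact List.getElem_mem _
      have hmem2 : arr2[i] ∈ arr2.take m := by
        rw [← List.getElem_take (xs := arr2) (j := m) (i := i) (h := by simp; omega)]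
        exact List.getElem_mem _
      obtain ⟨hx0, hxlt⟩ := hv1 _ hmem1
      obtain ⟨hy0, hylt⟩ := hv2 _ hmem2
      have hc : ((2 : Int) ^ m) = ((2 ^ m : Nat) : Int) := by push_cast; ring
      have hxn : (arr1[i]).toNat < 2 ^ m := by rw [hc] at hxlt; omega
      have hyn : (arr2[i]).toNat < 2 ^ m := by rw [hc] at hylt; omega
      simp only [Function.comp_def]
      exact pv_row m arr1[i] arr2[i] hx0 hy0 hxn hyn (by omega)
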